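-- pv_equiv track=rewrite | github.com/fspv/learning | codeforces/103715/C.py | max_sugar
-- ===== SOURCE A (Python) =====
-- from typing import List
--
-- def can_sell(requests: List[int], max_sugar: int, total_sugar: int) -> bool:
--     left_sugar = total_sugar
--
--     for request in requests:
--         will_give = min(request, max_sugar)
--
--         if will_give <= left_sugar:
--             left_sugar -= will_give
--         else:
--             return False
--
--     return True
--
-- def max_sugar(requests: List[int], total_sugar: int) -> int:
--     left, right = 0, total_sugar + 1
--
--     while left < right:
--         mid = left + (right - left) // 2
--         if not can_sell(requests, mid, total_sugar):
--             right = mid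
--         else:
--             left = mid + 1
--
--     return left - 1
-- ===== SOURCE B (Python) =====
-- def max_sugar(requests, total_sugar):
--     # No stock at all: even a per-customer cap of 0 cannot be honoured.
--     if total_sugar < 0:
--         return -1
--     # Sort once; the amount sold at cap m is sum(min(r, m) for r in requests),
--     # so the largest admissible cap falls out in closed form from a single scan
--     # of the sorted requests with a running prefix sum.
--     vs = sorted(requests)
--     if sum(vs) <= total_sugar:
--         return total_sugar
--     s = 0
--     j = 0
--     n = len(vs)
--     while s + vs[j] * (n - j) <= total_sugar:
--         s += vs[j]
--         j += 1
--     return (total_sugar - s) // (n - j)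
-- ===== Notes on version B (the rewrite author's own statement) =====
-- stated objective: alternative
-- what changed: Replaces the binary search over the cap (re-simulating all requests per probe) by one sort plus a single prefix-sum scan that yields the largest admissible cap in closed form via floor division; Pre_ restricts to the natural domain of nonnegative requests, outside which A's value (min(negative, cap) refunding sugar, order-dependently) is an accident of its feasibility check that B does not reproduce.
-- outside the precondition, e.g. on max_sugar([-5, 10], 3): A returns 3, B returns 8; on max_sugar([7, -1], 2): A returns 2, B returns 3
import Mathlib
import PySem

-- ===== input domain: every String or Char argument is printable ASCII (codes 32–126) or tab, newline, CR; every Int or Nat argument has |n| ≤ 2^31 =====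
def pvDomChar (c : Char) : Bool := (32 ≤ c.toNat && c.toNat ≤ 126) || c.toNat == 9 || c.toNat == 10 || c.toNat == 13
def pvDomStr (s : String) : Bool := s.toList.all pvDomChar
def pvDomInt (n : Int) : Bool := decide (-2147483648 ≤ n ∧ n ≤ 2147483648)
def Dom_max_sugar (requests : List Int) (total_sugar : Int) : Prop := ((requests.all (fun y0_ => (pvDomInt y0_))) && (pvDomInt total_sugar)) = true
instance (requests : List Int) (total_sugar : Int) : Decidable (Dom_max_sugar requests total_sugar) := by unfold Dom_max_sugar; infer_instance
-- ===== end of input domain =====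

-- B replaces A's binary search over the cap by one sort plus a prefix-sum scan with a
-- closed-form floor division; proved equal on nonnegative requests and nonnegative stock.


-- ===== PORT A =====
-- can_sell's for-loop with early return, as structural recursion on the requests
def canSellGo (maxS : Int) : List Int → Int → Bool
  | [], _ => true
  | r :: rest, left =>
      let w := min r maxS
      if w ≤ left then canSellGo maxS rest (left - w) else false

def canSell (requests : List Int) (maxS : Int) (totalS : Int) : Bool :=
  canSellGo maxS requests totalS

-- the while-loop of A's binary search
def bsLoop (requests : List Int) (totalS : Int) (left right : Int) : Int :=
  if h : left < right then
    let mid := left + PySem.Int.floordiv (right - left) 2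
    if !(canSell requests mid totalS) then bsLoop requests totalS left mid
    else bsLoop requests totalS (mid + 1) right
  else left - 1
termination_by (right - left).toNat
decreasing_by
  all_goals
    rw [PySem.Int.floordiv_eq_ediv_of_pos (by norm_num : (0:Int) < 2)]
    omega

def max_sugar (requests : List Int) (total_sugar : Int) : Int :=
  bsLoop requests total_sugar 0 (total_sugar + 1)

-- ===== PORT B =====
-- Source B's while-loop over the sorted list (s = running prefix sum, k = n - j elements left);
-- the [] case is Python's out-of-range vs[j], unreachable inside Pre_ (guarded by sum vs > T)
def findCapGo : List Int → Int → Int → Int → Int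
  | [], _, _, _ => 0
  | v :: rest, s, k, T =>
      if s + v * k ≤ T then findCapGo rest (s + v) (k - 1) T
      else PySem.Int.floordiv (T - s) k

def max_sugar_alt (requests : List Int) (total_sugar : Int) : Int :=
  if total_sugar < 0 then -1
  else
  let vs := PySem.List.sorted requests (fun x => x) false
  if vs.sum ≤ total_sugar then total_sugar
  else findCapGo vs 0 (vs.length : Int) total_sugar

-- ===== PRECONDITION & SPEC =====
-- Pre_ restricts to the natural domain of the task (nonnegative sugar requests): outside it
-- A still returns values, but they come from min(negative, cap) adding sugar back
-- order-dependently — an accident of A's feasibility check that B does not reproduce.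
def Pre_max_sugar (requests : List Int) (total_sugar : Int) : Prop :=
  ∀ r ∈ requests, 0 ≤ r
instance (requests : List Int) (total_sugar : Int) : Decidable (Pre_max_sugar requests total_sugar) := by unfold Pre_max_sugar; infer_instance

def pvWitness_max_sugar : List Int × Int := ([3, 1, 4], 5)

def Spec_max_sugar (requests : List Int) (total_sugar : Int) (out : Int) : Prop := out = max_sugar_alt requests total_sugar
instance (requests : List Int) (total_sugar : Int) (out : Int) : Decidable (Spec_max_sugar requests total_sugar out) := by unfold Spec_max_sugar; infer_instance

-- ===== CLAIM (what is proved, stated in full; the proofs are below) =====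
def Claim_equal_max_sugar : Prop := ∀ (requests : List Int) (total_sugar : Int), Dom_max_sugar requests total_sugar → Pre_max_sugar requests total_sugar → Spec_max_sugar requests total_sugar (max_sugar requests total_sugar)

-- ===== LEMMAS AND PROOFS =====

-- sum of min(v, m) over a list: the amount sold at cap m
def hsum (vs : List Int) (m : Int) : Int := (vs.map (fun v => min v m)).sum

theorem hsum_nil (m : Int) : hsum [] m = 0 := rfl

theorem hsum_cons (v : Int) (vs : List Int) (m : Int) :
    hsum (v :: vs) m = min v m + hsum vs m := by simp [hsum]

theorem hsum_le_sum (vs : List Int) (m : Int) : hsum vs m ≤ vs.sum := by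
  induction vs with
  | nil => simp [hsum_nil]
  | cons v vs ih => rw [hsum_cons]; simp only [List.sum_cons]; have := min_le_left v m; omega

theorem hsum_nonneg (vs : List Int) (m : Int) (hv : ∀ x ∈ vs, 0 ≤ x) (hm : 0 ≤ m) :
    0 ≤ hsum vs m := by
  induction vs with
  | nil => simp [hsum_nil]
  | cons v vs ih =>
      rw [hsum_cons]
      have h1 : 0 ≤ min v m := le_min (hv v (by simp)) hm
      have h2 := ih (fun x hx => hv x (by simp [hx]))
      omega

theorem hsum_le_len_mul (vs : List Int) (m : Int) : hsum vs m ≤ (vs.length : Int) * m := by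
  induction vs with
  | nil => simp [hsum_nil]
  | cons v vs ih =>
      rw [hsum_cons, List.length_cons]
      have h1 := min_le_right v m
      have h2 : ((vs.length + 1 : Nat) : Int) * m = (vs.length : Int) * m + m := by push_cast; ring
      omega

theorem hsum_eq_of_forall_le (vs : List Int) (m : Int) (h : ∀ x ∈ vs, m ≤ x) :
    hsum vs m = (vs.length : Int) * m := by
  induction vs with
  | nil => simp [hsum_nil]
  | cons v vs ih =>
      rw [hsum_cons, min_eq_right (h v (by simp)), List.length_cons]
      rw [ih (fun x hx => h x (by simp [hx]))]
      have : ((vs.length + 1 : Nat) : Int) * m = (vs.length : Int) * m + m := by push_cast; ring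
      omega

theorem hsum_lower (vs : List Int) (m c : Int) (h : ∀ x ∈ vs, c ≤ x) (hm : c ≤ m) :
    (vs.length : Int) * c ≤ hsum vs m := by
  induction vs with
  | nil => simp [hsum_nil]
  | cons v vs ih =>
      rw [hsum_cons, List.length_cons]
      have h1 : c ≤ min v m := le_min (h v (by simp)) hm
      have h2 := ih (fun x hx => h x (by simp [hx]))
      have h3 : ((vs.length + 1 : Nat) : Int) * c = (vs.length : Int) * c + c := by push_cast; ring
      omega

-- at cap m the amount sold is at least min(total demand, m)  (nonnegative requests)
theorem hsum_ge_min (vs : List Int) (m : Int) (hv : ∀ x ∈ vs, 0 ≤ x) (hm : 0 ≤ m) :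
    min vs.sum m ≤ hsum vs m := by
  induction vs with
  | nil => rw [hsum_nil]; simp
  | cons v vs ih =>
      rw [hsum_cons]
      have h2 := ih (fun x hx => hv x (by simp [hx]))
      have h3 : 0 ≤ v := hv v (by simp)
      have hs0 : 0 ≤ vs.sum := List.sum_nonneg (fun x hx => hv x (by simp [hx]))
      simp only [List.sum_cons]
      have key : min (v + vs.sum) m ≤ min v m + min vs.sum m := by
        simp only [min_def]; split_ifs <;> omega
      omega

-- hsum is invariant under permutation of the requests
theorem hsum_perm (vs ws : List Int) (m : Int) (h : vs.Perm ws) : hsum vs m = hsum ws m :=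
  List.Perm.sum_eq (h.map _)

-- on nonnegative requests with a nonnegative cap, A's feasibility check is exactly hsum ≤ left
theorem canSell_iff (rs : List Int) (m : Int) (hr : ∀ r ∈ rs, 0 ≤ r) (hm : 0 ≤ m) :
    ∀ left, 0 ≤ left → (canSellGo m rs left = true ↔ hsum rs m ≤ left) := by
  induction rs with
  | nil => intro left hleft; simp [canSellGo, hsum_nil]; omega
  | cons r rest ih =>
      intro left hleft
      have h0 : 0 ≤ min r m := le_min (hr r (by simp)) hm
      have hrest := ih (fun x hx => hr x (by simp [hx]))
      simp only [canSellGo, hsum_cons]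
      by_cases hc : min r m ≤ left
      · rw [if_pos hc, hrest (left - min r m) (by omega)]; omega
      · rw [if_neg hc]
        have := hsum_nonneg rest m (fun x hx => hr x (by simp [hx])) hm
        constructor
        · intro h; exact absurd h (by simp)
        · intro h; omega

-- monotonicity of A's feasibility check
theorem canSellGo_mono (rs : List Int) : ∀ (m m' left left' : Int), m' ≤ m → left ≤ left' →
    canSellGo m rs left = true → canSellGo m' rs left' = true := by
  induction rs with
  | nil => intro m m' left left' _ _ _; rfl
  | cons r rest ih =>
      intro m m' left left' hm hl h
      simp only [canSellGo] at h ⊢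
      by_cases hc : min r m ≤ left
      · rw [if_pos hc] at h
        have hmin : min r m' ≤ min r m := min_le_min le_rfl hm
        rw [if_pos (by omega)]
        exact ih m m' (left - min r m) (left' - min r m') hm (by omega) h
      · rw [if_neg hc] at h; exact absurd h (by simp)

-- spec of A's binary-search loop: the result r satisfies -1 ≤ r ≤ ts,
-- (r ≥ 0 → feasible r) and (r < ts → ¬ feasible (r+1))
theorem bsLoop_spec (requests : List Int) (ts : Int) :
    ∀ (n : Nat) (l r : Int), (r - l).toNat ≤ n → 0 ≤ l → l ≤ r → r ≤ ts + 1 →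
    (∀ m, 0 ≤ m → m < l → canSell requests m ts = true) →
    (∀ m, r ≤ m → m ≤ ts → canSell requests m ts = false) →
    (-1 ≤ bsLoop requests ts l r ∧ bsLoop requests ts l r ≤ ts ∧
     (0 ≤ bsLoop requests ts l r → canSell requests (bsLoop requests ts l r) ts = true) ∧
     (bsLoop requests ts l r < ts → canSell requests (bsLoop requests ts l r + 1) ts = false)) := by
  intro n
  induction n with
  | zero =>
      intro l r hn h0 hlr hr hL hR
      have hle : r ≤ l := by omega
      rw [bsLoop, dif_neg (by omega)]
      refine ⟨by omega, by omega, fun h => hL _ (by omega) (by omega), fun h => hR _ (by omega) (by omega)⟩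
  | succ n ih =>
      intro l r hn h0 hlr hr hL hR
      by_cases hlt : l < r
      · rw [bsLoop, dif_pos hlt]
        have h2 : PySem.Int.floordiv (r - l) 2 = (r - l) / 2 :=
          PySem.Int.floordiv_eq_ediv_of_pos (by norm_num)
        set mid := l + PySem.Int.floordiv (r - l) 2 with hmid
        have hmb : l ≤ mid ∧ mid < r := by rw [hmid, h2]; omega
        by_cases hcs : canSell requests mid ts = true
        · rw [if_neg (by simp [hcs])]
          refine ih (mid + 1) r (by omega) (by omega) (by omega) hr ?_ hR
          intro m hm0 hm
          exact canSellGo_mono requests mid m ts ts (by omega) le_rfl hcs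
        · rw [if_pos (by simp [Bool.not_eq_true] at hcs ⊢; exact hcs)]
          refine ih l mid (by omega) h0 (by omega) (by omega) hL ?_
          intro m hm hmts
          by_contra hc
          have : canSell requests m ts = true := by
            cases h : canSell requests m ts
            · exact absurd h hc
            · rfl
          exact hcs (canSellGo_mono requests m mid ts ts hm le_rfl this)
      · rw [bsLoop, dif_neg hlt]
        refine ⟨by omega, by omega, fun h => hL _ (by omega) (by omega), fun h => hR _ (by omega) (by omega)⟩

-- spec of B's scan: on a sorted nonnegative non-empty list whose total exceeds T,
-- it returns the largest cap m with s + Σ min(v, m) ≤ T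
theorem findCapGo_spec : ∀ (vs : List Int) (s T : Int), vs ≠ [] →
    vs.Pairwise (· ≤ ·) → (∀ v ∈ vs, 0 ≤ v) → T < s + vs.sum →
    ∀ m, 0 ≤ m → (s + hsum vs m ≤ T ↔ m ≤ findCapGo vs s (vs.length : Int) T) := by
  intro vs
  induction vs with
  | nil => intro s T h; exact absurd rfl h
  | cons v rest ih =>
      intro s T _ hsort hnn hT m hm
      have hvr : ∀ x ∈ rest, v ≤ x := (List.pairwise_cons.1 hsort).1
      simp only [findCapGo, List.length_cons]
      have hk : ((rest.length + 1 : Nat) : Int) = (rest.length : Int) + 1 := by push_cast; ring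
      by_cases hbr : s + v * ((rest.length + 1 : Nat) : Int) ≤ T
      · rw [if_pos hbr]
        rcases List.eq_nil_or_concat' rest with rfl | _
        · exfalso; simp at hbr; simp [List.sum_cons] at hT; omega
        · have hrne : rest ≠ [] := by rename_i h; rcases h with ⟨ys, y, rfl⟩; simp
          have hcast : ((rest.length + 1 : Nat) : Int) - 1 = (rest.length : Int) := by push_cast; ring
          rw [hcast]
          have ihh := ih (s + v) T hrne (List.pairwise_cons.1 hsort).2
            (fun x hx => hnn x (by simp [hx]))
            (by simp [List.sum_cons] at hT; omega) m hm
          rw [hsum_cons]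
          constructor
          · intro h
            by_cases hvm : v ≤ m
            · exact ihh.1 (by rw [min_eq_left hvm] at h; omega)
            · -- m < v : every element of v::rest is > m
              apply ihh.1
              have hrm : hsum rest m = (rest.length : Int) * m :=
                hsum_eq_of_forall_le rest m (fun x hx => le_trans (by omega) (hvr x hx))
              rw [hrm]
              rw [hk] at hbr
              nlinarith [Int.natCast_nonneg rest.length]
          · intro h
            have := ihh.2 h
            have := min_le_left v m
            omega
      · rw [if_neg hbr]
        rw [PySem.Int.le_floordiv_iff_mul_le (by positivity)]
        rw [hsum_cons]
        constructor
        · intro h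
          by_cases hvm : m ≤ v
          · have hall : hsum rest m = (rest.length : Int) * m :=
              hsum_eq_of_forall_le rest m (fun x hx => le_trans hvm (hvr x hx))
            rw [min_eq_right hvm, hall] at h
            rw [hk]; nlinarith
          · exfalso
            have hlow : (rest.length : Int) * v ≤ hsum rest m :=
              hsum_lower rest m v hvr (by omega)
            have : min v m = v := min_eq_left (by omega)
            rw [hk] at hbr
            have hexp : v * ((rest.length : Int) + 1) = (rest.length : Int) * v + v := by ring
            omega
        · intro h
          have h1 : hsum rest m ≤ (rest.length : Int) * m := hsum_le_len_mul rest m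
          have h2 := min_le_right v m
          rw [hk] at h
          nlinarith

-- ===== VERDICT (by name: the statement is the Claim_ definition above) =====
theorem max_sugar_spec : Claim_equal_max_sugar := by
  intro requests ts _ hnn
  unfold Spec_max_sugar max_sugar max_sugar_alt
  by_cases htneg : ts < 0
  · rw [if_pos htneg, bsLoop, dif_neg (by omega)]; norm_num
  rw [if_neg htneg]
  have hts : 0 ≤ ts := by omega
  -- A's result a and its characterisation via hsum
  obtain ⟨a1, a2, a3, a4⟩ :=
    bsLoop_spec requests ts (ts + 1).toNat 0 (ts + 1) (by omega) le_rfl (by omega) le_rfl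
      (fun m h1 h2 => by omega) (fun m h1 h2 => by omega)
  set a := bsLoop requests ts 0 (ts + 1) with ha
  have hzero : hsum requests 0 = 0 := by
    rw [hsum_eq_of_forall_le requests 0 hnn]; ring
  have ha0 : 0 ≤ a := by
    by_contra hneg
    have haeq : a = -1 := by omega
    have := a4 (by omega)
    rw [haeq] at this
    have hfeas : canSell requests 0 ts = true := by
      rw [canSell, canSell_iff requests 0 hnn le_rfl ts hts, hzero]; exact hts
    simp [hfeas] at this
  have ha3 : hsum requests a ≤ ts := by
    have := a3 ha0
    rwa [canSell, canSell_iff requests a hnn ha0 ts hts] at this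
  have ha4 : a < ts → ¬ hsum requests (a + 1) ≤ ts := by
    intro hlt
    have := a4 hlt
    rw [canSell] at this
    intro hc
    rw [← canSell_iff requests (a + 1) hnn (by omega) ts hts] at hc
    simp [this] at hc
  -- B's side: facts about the sorted list
  set vs := PySem.List.sorted requests (fun x => x) false with hvs
  have hperm : vs.Perm requests := PySem.List.sorted_perm requests (fun x => x) false
  have hsumeq : vs.sum = requests.sum := hperm.sum_eq
  have hhs : ∀ m, hsum vs m = hsum requests m := fun m => hsum_perm vs requests m hperm
  have hsort : vs.Pairwise (· ≤ ·) := PySem.List.sorted_pairwise requests (fun x => x)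
  have hnnvs : ∀ v ∈ vs, 0 ≤ v := fun v hv => hnn v (hperm.mem_iff.1 hv)
  by_cases hcase : vs.sum ≤ ts
  · rw [if_pos hcase]
    -- every cap is feasible, so a = ts
    by_contra hne
    have hlt : a < ts := by omega
    exact ha4 hlt (le_trans (hsum_le_sum requests (a + 1)) (by omega))
  · rw [if_neg hcase]
    have hne : vs ≠ [] := by intro h; rw [h] at hcase; simp at hcase; omega
    have hspec := findCapGo_spec vs 0 ts hne hsort hnnvs (by omega)
    set b := findCapGo vs 0 (vs.length : Int) ts with hb
    have hiff : ∀ m, 0 ≤ m → (hsum requests m ≤ ts ↔ m ≤ b) := by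
      intro m hm
      have := hspec m hm
      rw [hhs m] at this
      omega
    have hb0 : 0 ≤ b := (hiff 0 le_rfl).1 (by omega)
    have hbts : b ≤ ts := by
      by_contra hc
      have hfe : hsum requests (ts + 1) ≤ ts := (hiff (ts + 1) (by omega)).2 (by omega)
      have hgm := hsum_ge_min requests (ts + 1) hnn (by omega)
      have hlo : ts + 1 ≤ min requests.sum (ts + 1) := le_min (by omega) le_rfl
      omega
    -- a ≤ b from feasibility of a; a ≥ b from maximality
    have hab : a ≤ b := (hiff a ha0).1 ha3
    by_contra hne2
    have hlt : a < b := by omega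
    have halt : a < ts := by omega
    exact ha4 halt ((hiff (a + 1) (by omega)).2 (by omega))
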